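-- pv_equiv track=rewrite | github.com/Feasinde/COMP6321_machine_learning | dataset.py | mergeSameAuthors
-- ===== SOURCE A (Python) =====
-- def mergeSameAuthors(conv):
--     """Merges contiguous messages by the same author
--
--     In: list of id-message tuples where several contiguous messages might belong to the same author
--     Out: list of id-message tuples alternating authors
--
--     """
--     conversation_=conv.copy()
--     change=True
--     while change:
--         change=False
--         for index in range(len(conversation_)-1):
--             if conversation_[index][0]==conversation_[index+1][0]:
--                 try:
--                     conversation_[index][1]+=" "+conversation_[index+1][1]
--                 except TypeError:
--                     pass
--                 conversation_[index+1][0]=''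
--                 change=True
--         conversation_ = [message for message in conversation_ if not message[0]=='']
--     return conversation_
-- ===== SOURCE B (Python) =====
-- def mergeSameAuthors(conv):
--     """Merges contiguous messages by the same author
--
--     Single forward pass: drop empty-author messages, then group each
--     contiguous run of equal authors and concatenate its texts once.
--     (Does not mutate the input, unlike the original.)
--     """
--     msgs = [m for m in conv if m[0] != '']
--     out = []
--     i = 0
--     n = len(msgs)
--     while i < n:
--         j = i + 1
--         while j < n and msgs[j][0] == msgs[i][0]:
--             j += 1
--         msg = msgs[i].copy()
--         if j > i + 1:
--             text = msg[1]
--             for k in range(i + 1, j):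
--                 text += " " + msgs[k][1]
--             msg[1] = text
--         out.append(msg)
--         i = j
--     return out
-- ===== Notes on version B (the rewrite author's own statement) =====
-- stated objective: simpler
-- what changed: Replaces A's repeated merge-and-filter passes over the whole list (loop until no change, with ''-author sentinel marking) by a single forward pass that drops empty-author messages and concatenates each contiguous equal-author run once.
-- intended difference: On conversations with no two adjacent equal authors but with a pattern author,'',author (an empty-author message between two equal authors), A's first pass makes no merge so it stops after dropping the '' message and returns the two equal-author messages unmerged, while B merges them; merging contiguous same-author messages once placeholders are dropped is the function's stated purpose. — e.g. on mergeSameAuthors([["a", "x"], ["", "z"], ["a", "y"]]): A returns [["a", "x"], ["a", "y"]], B returns [["a", "x y"]]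
-- outside the precondition, e.g. on mergeSameAuthors([[''], ['b', 'x']]): A returns [['b', 'x']], B returns [['b', 'x']]; on mergeSameAuthors([['a'], ['', 't'], ['a', 'x']]): A returns [['a'], ['a', 'x']], B raises IndexError
import Mathlib
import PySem

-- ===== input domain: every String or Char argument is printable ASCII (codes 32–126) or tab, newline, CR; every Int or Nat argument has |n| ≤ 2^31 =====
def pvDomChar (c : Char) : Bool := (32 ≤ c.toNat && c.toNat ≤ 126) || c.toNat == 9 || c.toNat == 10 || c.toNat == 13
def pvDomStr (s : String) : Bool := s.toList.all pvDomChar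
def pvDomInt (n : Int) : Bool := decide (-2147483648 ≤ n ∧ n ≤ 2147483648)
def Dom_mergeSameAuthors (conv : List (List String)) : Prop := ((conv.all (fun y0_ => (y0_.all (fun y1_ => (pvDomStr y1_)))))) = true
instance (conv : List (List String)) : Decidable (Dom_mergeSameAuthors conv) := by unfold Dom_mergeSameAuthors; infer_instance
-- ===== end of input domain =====

-- B replaces A's repeated merge-and-filter passes (with their ''-author sentinel marking)
-- by one forward pass over the runs of equal authors (objective: simpler).  Equivalence is
-- about the RETURN value only: the Python A mutates the inner message lists of its
-- argument in place, B does not.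

-- ===== PORT A =====
-- message[0] (the author) and message[1] (the text); Python raises IndexError on
-- shorter messages, which Pre_ excludes, so the defaulted accessors are exact there.
def pvKey (m : List String) : String := m.headD ""
def pvTxt (m : List String) : String := m.getD 1 ""

-- one 'for index in range(len(...)-1)' pass; cur is conversation_[index], carrying the
-- in-place update made at the previous index exactly as the Python does
def pvPassGo (cur : List String) (rest : List (List String)) (c : Bool) :
    List (List String) × Bool :=
  match rest with
  | [] => ([cur], c)
  | m2 :: rest' =>
    if pvKey cur == pvKey m2 then
      let p := pvPassGo (m2.set 0 "") rest' true
      (cur.set 1 (pvTxt cur ++ " " ++ pvTxt m2) :: p.1, p.2)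
    else
      let p := pvPassGo m2 rest' c
      (cur :: p.1, p.2)

def pvPassA (l : List (List String)) (c : Bool) : List (List String) × Bool :=
  match l with
  | [] => ([], c)
  | m :: rest => pvPassGo m rest c

-- [message for message in conversation_ if not message[0]=='']
def pvFilt (l : List (List String)) : List (List String) := l.filter (fun m => !(pvKey m == ""))

-- 'while change:' — each changing pass removes at least one element, so
-- (length + 1) passes always reach the fixpoint (proved below)
def pvLoopA : Nat → List (List String) → List (List String)
  | 0, l => l
  | fuel+1, l =>
    let p := pvPassA l false
    let l2 := pvFilt p.1
    if p.2 then pvLoopA fuel l2 else l2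

def mergeSameAuthors (conv : List (List String)) : List (List String) :=
  pvLoopA (conv.length + 1) conv

-- ===== PORT B =====
-- Source B's forward scan: cur is the first message of the current run, text the
-- accumulated run text, merged says whether the run has a second message (j > i+1)
def pvAltAcc (cur : List String) (text : String) (merged : Bool) :
    List (List String) → List (List String)
  | [] => [if merged then cur.set 1 text else cur]
  | x :: t =>
    if pvKey x == pvKey cur then pvAltAcc cur (text ++ " " ++ pvTxt x) true t
    else (if merged then cur.set 1 text else cur) :: pvAltAcc x (pvTxt x) false t

def pvAltTop : List (List String) → List (List String)
  | [] => []
  | m :: rest => pvAltAcc m (pvTxt m) false rest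

def mergeSameAuthors_alt (conv : List (List String)) : List (List String) :=
  pvAltTop (pvFilt conv)

-- ===== PRECONDITION & SPEC =====
-- Pre_ excludes conversations with under-length messages whose missing field the Python
-- indexing may hit (IndexError): empty messages, one-field messages with empty author,
-- and one-field messages whose author recurs in the conversation; on some of these A
-- happens to return (the merge reading message[1] never fires) but they are excluded
-- with the whole shape, as B's merge would read the missing text field.
def Pre_mergeSameAuthors (conv : List (List String)) : Prop :=
  ∀ m ∈ conv, 2 ≤ m.length ∨
    (m.length = 1 ∧ ¬ m.headD "" = "" ∧ conv.countP (fun x => x.headD "" == m.headD "") ≤ 1)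
instance (conv : List (List String)) : Decidable (Pre_mergeSameAuthors conv) := by
  unfold Pre_mergeSameAuthors; infer_instance
def pvWitness_mergeSameAuthors : List (List String) := [["a", "x"], ["a", "y"], ["b", "z"]]

-- On conversations with no two adjacent equal authors but with a pattern
-- author,'',author (an empty-author message between two equal authors), A's first pass
-- makes no merge, so it stops after dropping the '' message and returns the two equal
-- author messages unmerged, while B merges them; merging contiguous same-author
-- messages once placeholders are dropped is the function's stated purpose.
def D_mergeSameAuthors (conv : List (List String)) : Prop :=
  (let ks := conv.map fun m => m.headD ""
   ((ks.zip ks.tail).all fun p => p.1 != p.2) &&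
   ((ks.zip (ks.tail.zip ks.tail.tail)).any fun p =>
     p.1 != "" && p.2.1 == "" && p.2.2 == p.1)) = true
instance (conv : List (List String)) : Decidable (D_mergeSameAuthors conv) := by
  unfold D_mergeSameAuthors; infer_instance

def Spec_mergeSameAuthors (conv : List (List String)) (out : List (List String)) : Prop :=
  ¬ D_mergeSameAuthors conv → out = mergeSameAuthors_alt conv
instance (conv : List (List String)) (out : List (List String)) : Decidable (Spec_mergeSameAuthors conv out) := by
  unfold Spec_mergeSameAuthors; infer_instance

def pvDiffWitness_mergeSameAuthors : List (List String) := [["a", "x"], ["", "z"], ["a", "y"]]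
def pvDiffWitnessOut_mergeSameAuthors : (List (List String)) × (List (List String)) :=
  ([["a", "x"], ["a", "y"]], [["a", "x y"]])

-- ===== CLAIM (what is proved, stated in full; the proofs are below) =====
def Claim_unchanged_mergeSameAuthors : Prop := ∀ (conv : List (List String)), Dom_mergeSameAuthors conv → Pre_mergeSameAuthors conv → Spec_mergeSameAuthors conv (mergeSameAuthors conv)
def Claim_changed_mergeSameAuthors : Prop := Dom_mergeSameAuthors (pvDiffWitness_mergeSameAuthors) ∧ Pre_mergeSameAuthors (pvDiffWitness_mergeSameAuthors) ∧ D_mergeSameAuthors (pvDiffWitness_mergeSameAuthors) ∧ mergeSameAuthors (pvDiffWitness_mergeSameAuthors) = pvDiffWitnessOut_mergeSameAuthors.1 ∧ mergeSameAuthors_alt (pvDiffWitness_mergeSameAuthors) = pvDiffWitnessOut_mergeSameAuthors.2 ∧ pvDiffWitnessOut_mergeSameAuthors.1 ≠ pvDiffWitnessOut_mergeSameAuthors.2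
def Claim_exact_mergeSameAuthors : Prop := ∀ (conv : List (List String)), Dom_mergeSameAuthors conv → Pre_mergeSameAuthors conv → D_mergeSameAuthors conv → mergeSameAuthors conv ≠ mergeSameAuthors_alt conv

-- ===== LEMMAS AND PROOFS =====

-- ---- generic small helpers ----
theorem pv_countP_cons (p : List String → Bool) (a : List String) (l : List (List String)) :
    (a :: l).countP p = l.countP p + (if p a = true then 1 else 0) := List.countP_cons

theorem pv_countP_cons_t (p : List String → Bool) (a : List String) (l : List (List String))
    (hp : p a = true) : (a :: l).countP p = l.countP p + 1 := by
  rw [pv_countP_cons, hp]; simp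

theorem pv_countP_cons_f (p : List String → Bool) (a : List String) (l : List (List String))
    (hp : p a = false) : (a :: l).countP p = l.countP p := by
  rw [pv_countP_cons, hp]; simp

theorem pv_countP_mem (p : List String → Bool) (l : List (List String)) (x : List String)
    (hx : x ∈ l) (hp : p x = true) : 1 ≤ l.countP p := by
  induction l with
  | nil => simp at hx
  | cons a t ih =>
    rcases List.mem_cons.mp hx with rfl | hx
    · rw [pv_countP_cons, if_pos hp]; omega
    · have := ih hx; rw [pv_countP_cons]; omega

theorem pv_countP_filter_le (p q : List String → Bool) (l : List (List String)) :
    (l.filter q).countP p ≤ l.countP p := by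
  induction l with
  | nil => simp
  | cons a t ih =>
    by_cases hq : q a
    · rw [List.filter_cons_of_pos hq, pv_countP_cons, pv_countP_cons]; omega
    · rw [List.filter_cons_of_neg (by simpa using hq), pv_countP_cons]; omega

theorem pv_str_assoc (a b c : String) : (a ++ b) ++ c = a ++ (b ++ c) :=
  String.append_assoc

-- ---- small facts about the accessors ----
theorem pv_key_set1 (m : List String) (s : String) : pvKey (m.set 1 s) = pvKey m := by
  cases m with
  | nil => rfl
  | cons a t => cases t <;> rfl

theorem pv_txt_set1 (m : List String) (s : String) (h : 2 ≤ m.length) :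
    pvTxt (m.set 1 s) = s := by
  match m, h with
  | a :: b :: t, _ => rfl

theorem pv_key_set0 (m : List String) : pvKey (m.set 0 "") = "" := by
  cases m <;> rfl

-- proof-side forms of the two conditions in D_
def pvNoAdjB : List (List String) → Bool
  | a :: b :: rest => !(pvKey a == pvKey b) && pvNoAdjB (b :: rest)
  | _ => true

def pvGapB : List (List String) → Bool
  | a :: b :: c :: rest =>
    (!(pvKey a == "") && (pvKey b == "") && (pvKey c == pvKey a)) || pvGapB (b :: c :: rest)
  | _ => false

theorem pv_noadj_bridge (l : List (List String)) :
    pvNoAdjB l = (let ks := l.map fun m => m.headD ""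
                  (ks.zip ks.tail).all fun p => p.1 != p.2) := by
  induction l with
  | nil => rfl
  | cons a t ih =>
    cases t with
    | nil => rfl
    | cons b t' =>
      simp only [List.map_cons, List.tail_cons] at ih ⊢
      simp only [List.zip_cons_cons, List.all_cons]
      rw [← ih]
      simp [pvNoAdjB, pvKey, bne]

theorem pv_gap_bridge (l : List (List String)) :
    pvGapB l = (let ks := l.map fun m => m.headD ""
                (ks.zip (ks.tail.zip ks.tail.tail)).any fun p =>
                  p.1 != "" && p.2.1 == "" && p.2.2 == p.1) := by
  induction l with
  | nil => rfl
  | cons a t ih =>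
    cases t with
    | nil => rfl
    | cons b t2 =>
      cases t2 with
      | nil => rfl
      | cons c t3 =>
        simp only [List.map_cons, List.tail_cons] at ih ⊢
        simp only [List.zip_cons_cons, List.any_cons]
        rw [← ih]
        simp [pvGapB, pvKey, bne]

theorem pv_noadj_tail (a : List String) (t : List (List String))
    (h : pvNoAdjB (a :: t) = true) : pvNoAdjB t = true := by
  cases t with
  | nil => rfl
  | cons b t' =>
    simp only [pvNoAdjB, Bool.and_eq_true] at h
    exact h.2

theorem pv_noadj_cons_false (a : List String) (t : List (List String))
    (h : pvNoAdjB t = false) : pvNoAdjB (a :: t) = false := by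
  cases t with
  | nil => simp [pvNoAdjB] at h
  | cons x t' => simp [pvNoAdjB, h]

theorem pv_gap_tail (a : List String) (t : List (List String))
    (h : pvGapB (a :: t) = false) : pvGapB t = false := by
  match t with
  | [] => rfl
  | [b] => rfl
  | b :: c :: r =>
    simp only [pvGapB, Bool.or_eq_false_iff] at h
    exact h.2

theorem pv_chain_filt_aux : ∀ (n : Nat) (l : List (List String)), l.length ≤ n →
    pvNoAdjB l = true → pvGapB l = false → pvNoAdjB (pvFilt l) = true := by
  intro n
  induction n with
  | zero =>
    intro l hlen _ _
    have : l = [] := List.eq_nil_of_length_eq_zero (by omega)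
    subst this
    rfl
  | succ n ih =>
    intro l hlen hch hg
    match l with
    | [] => rfl
    | [a] =>
      by_cases hk : pvKey a = "" <;>
        simp [pvFilt, List.filter_cons, hk, pvNoAdjB]
    | a :: b :: t =>
      have hab : (pvKey a == pvKey b) = false := by
        simp only [pvNoAdjB, Bool.and_eq_true, Bool.not_eq_eq_eq_not, Bool.not_true] at hch
        exact hch.1
      have hch2 : pvNoAdjB (b :: t) = true := pv_noadj_tail a _ hch
      have hgt : pvGapB (b :: t) = false := pv_gap_tail a _ hg
      by_cases hka : pvKey a = ""
      · have hfe : pvFilt (a :: b :: t) = pvFilt (b :: t) := by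
          simp [pvFilt, List.filter_cons, hka]
        rw [hfe]
        exact ih (b :: t) (by simp at hlen ⊢; omega) hch2 hgt
      · have hfe : pvFilt (a :: b :: t) = a :: pvFilt (b :: t) := by
          simp [pvFilt, List.filter_cons, hka]
        rw [hfe]
        by_cases hkb : pvKey b = ""
        · have hfe2 : pvFilt (b :: t) = pvFilt t := by
            simp [pvFilt, List.filter_cons, hkb]
          rw [hfe2]
          cases t with
          | nil => simp [pvFilt, pvNoAdjB]
          | cons cc t' =>
            by_cases hkc : pvKey cc = ""
            · exfalso
              simp only [pvNoAdjB, Bool.and_eq_true, Bool.not_eq_eq_eq_not, Bool.not_true] at hch2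
              have hbc := hch2.1
              rw [hkb, hkc] at hbc
              simp at hbc
            · have hfe3 : pvFilt (cc :: t') = cc :: pvFilt t' := by
                simp [pvFilt, List.filter_cons, hkc]
              have hac : ¬ pvKey cc = pvKey a := by
                intro hcon
                have hgap : pvGapB (a :: b :: cc :: t') = true := by
                  simp only [pvGapB, Bool.or_eq_true]
                  refine Or.inl ?_
                  simp [hka, hkb, hcon]
                rw [hgap] at hg
                simp at hg
              have hrec : pvNoAdjB (pvFilt (cc :: t')) = true := by
                refine ih (cc :: t') (by simp at hlen ⊢; omega) ?_ ?_
                · exact pv_noadj_tail b _ hch2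
                · exact pv_gap_tail b _ hgt
              rw [hfe3] at hrec ⊢
              simp only [pvNoAdjB, Bool.and_eq_true]
              refine ⟨?_, hrec⟩
              simp only [Bool.not_eq_eq_eq_not, Bool.not_true]
              exact beq_eq_false_iff_ne.mpr (fun h => hac h.symm)
        · have hfe2 : pvFilt (b :: t) = b :: pvFilt t := by
            simp [pvFilt, List.filter_cons, hkb]
          have hrec : pvNoAdjB (pvFilt (b :: t)) = true :=
            ih (b :: t) (by simp at hlen ⊢; omega) hch2 hgt
          rw [hfe2] at hrec ⊢
          simp only [pvNoAdjB, Bool.and_eq_true]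
          exact ⟨by simp [hab], hrec⟩

theorem pv_chain_filt (l : List (List String))
    (hch : pvNoAdjB l = true) (hg : pvGapB l = false) : pvNoAdjB (pvFilt l) = true :=
  pv_chain_filt_aux l.length l (le_refl _) hch hg

theorem pv_gap_breaks_aux : ∀ (n : Nat) (l : List (List String)), l.length ≤ n →
    pvNoAdjB l = true → pvGapB l = true → pvNoAdjB (pvFilt l) = false := by
  intro n
  induction n with
  | zero =>
    intro l hlen _ hg
    have : l = [] := List.eq_nil_of_length_eq_zero (by omega)
    subst this
    simp [pvGapB] at hg
  | succ n ih =>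
    intro l hlen hch hg
    match l with
    | [] => simp [pvGapB] at hg
    | [a] => simp [pvGapB] at hg
    | [a, b] => simp [pvGapB] at hg
    | a :: b :: cc :: r =>
      simp only [pvGapB, Bool.or_eq_true] at hg
      rcases hg with hg | hg
      · -- the flagged triple: key a ≠ "", key b = "", key cc = key a
        simp only [Bool.and_eq_true, Bool.not_eq_eq_eq_not, Bool.not_true] at hg
        rcases hg with ⟨⟨ha, hb⟩, hc⟩
        have hka : ¬ pvKey a = "" := by
          intro hcon
          rw [hcon] at ha
          simp at ha
        have hkb : pvKey b = "" := by simpa using hb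
        have hkc : pvKey cc = pvKey a := by simpa using hc
        have hkcne : ¬ pvKey cc = "" := fun h => hka (hkc ▸ h)
        have hfe : pvFilt (a :: b :: cc :: r) = a :: cc :: pvFilt r := by
          simp [pvFilt, List.filter_cons, hka, hkb, hkcne]
        rw [hfe]
        simp only [pvNoAdjB, Bool.and_eq_false_iff]
        refine Or.inl ?_
        simp [hkc]
      · have hrec : pvNoAdjB (pvFilt (b :: cc :: r)) = false :=
          ih (b :: cc :: r) (by simp at hlen ⊢; omega) (pv_noadj_tail a _ hch) hg
        by_cases hka : pvKey a = ""
        · have hfe : pvFilt (a :: b :: cc :: r) = pvFilt (b :: cc :: r) := by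
            simp [pvFilt, List.filter_cons, hka]
          rw [hfe]; exact hrec
        · have hfe : pvFilt (a :: b :: cc :: r) = a :: pvFilt (b :: cc :: r) := by
            simp [pvFilt, List.filter_cons, hka]
          rw [hfe]
          exact pv_noadj_cons_false a _ hrec

theorem pv_gap_breaks (l : List (List String))
    (hch : pvNoAdjB l = true) (hg : pvGapB l = true) : pvNoAdjB (pvFilt l) = false :=
  pv_gap_breaks_aux l.length l (le_refl _) hch hg

-- ---- the invariant pvU: any too-short message has an author occurring at most once ----
def pvU (l : List (List String)) : Prop :=
  ∀ m ∈ l, m.length ≤ 1 → pvKey m = "" ∨ l.countP (fun x => pvKey x == pvKey m) ≤ 1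

theorem pvU_tail (m : List String) (l : List (List String)) (hU : pvU (m :: l)) : pvU l := by
  intro x hx hlen
  rcases hU x (List.mem_cons_of_mem _ hx) hlen with h | h
  · exact Or.inl h
  · refine Or.inr ?_
    have := pv_countP_cons (fun y => pvKey y == pvKey x) m l
    omega

theorem pvU_mark (m1 m2 : List String) (rest : List (List String))
    (hU : pvU (m1 :: m2 :: rest)) : pvU (m2.set 0 "" :: rest) := by
  intro x hx hlen
  rcases List.mem_cons.mp hx with rfl | hx
  · exact Or.inl (pv_key_set0 m2)
  · rcases hU x (by simp [hx]) hlen with h | h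
    · exact Or.inl h
    · by_cases hk : pvKey x = ""
      · exact Or.inl hk
      · refine Or.inr ?_
        have h0 : (pvKey (m2.set 0 "") == pvKey x) = false := by
          rw [pv_key_set0]
          exact beq_eq_false_iff_ne.mpr (fun he => hk he.symm)
        have h1 := pv_countP_cons_f (fun y => pvKey y == pvKey x) (m2.set 0 "") rest h0
        have h2 := pv_countP_cons (fun y => pvKey y == pvKey x) m1 (m2 :: rest)
        have h3 := pv_countP_cons (fun y => pvKey y == pvKey x) m2 rest
        omega

theorem pvU_two (m1 m2 : List String) (rest : List (List String))
    (hU : pvU (m1 :: m2 :: rest)) (hk : pvKey m1 = pvKey m2) (hne : ¬ pvKey m1 = "") :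
    2 ≤ m1.length ∧ 2 ≤ m2.length := by
  have h2 := pv_countP_cons_t (fun y => pvKey y == pvKey m1) m1 (m2 :: rest) (by simp)
  have h3 := pv_countP_cons_t (fun y => pvKey y == pvKey m1) m2 rest (by simp [hk])
  constructor
  · by_contra h
    rcases hU m1 (by simp) (by omega) with h' | h'
    · exact hne h'
    · omega
  · by_contra h
    rcases hU m2 (by simp) (by omega) with h' | h'
    · exact hne (hk ▸ h')
    · rw [← hk] at h'
      omega

-- ---- facts about one pass ----
theorem pv_passGo_len (rest : List (List String)) : ∀ (cur : List String) (c : Bool),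
    ((pvPassGo cur rest c).1).length = rest.length + 1 := by
  induction rest with
  | nil => intro cur c; rfl
  | cons m2 rest' ih =>
    intro cur c
    by_cases h : pvKey cur == pvKey m2 <;> simp [pvPassGo, h, ih]

theorem pv_passGo_true (rest : List (List String)) : ∀ (cur : List String),
    (pvPassGo cur rest true).2 = true := by
  induction rest with
  | nil => intro cur; rfl
  | cons m2 rest' ih =>
    intro cur
    by_cases h : pvKey cur == pvKey m2 <;> simp [pvPassGo, h, ih]

theorem pv_passGo_false_id (rest : List (List String)) : ∀ (cur : List String),
    (pvPassGo cur rest false).2 = false →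
    (pvPassGo cur rest false).1 = cur :: rest ∧ pvNoAdjB (cur :: rest) = true := by
  induction rest with
  | nil => intro cur _; exact ⟨rfl, rfl⟩
  | cons m2 rest' ih =>
    intro cur h
    by_cases hk : pvKey cur == pvKey m2
    · exfalso
      simp [pvPassGo, hk, pv_passGo_true] at h
    · simp only [pvPassGo, hk, Bool.false_eq_true, ↓reduceIte] at h
      rcases ih m2 h with ⟨h1, h2⟩
      refine ⟨?_, ?_⟩
      · simp [pvPassGo, hk, h1]
      · simp only [pvNoAdjB, Bool.and_eq_true, h2, and_true]
        simpa using hk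

theorem pv_passGo_of_noadj (rest : List (List String)) : ∀ (cur : List String) (c : Bool),
    pvNoAdjB (cur :: rest) = true → pvPassGo cur rest c = (cur :: rest, c) := by
  induction rest with
  | nil => intro cur c _; rfl
  | cons m2 rest' ih =>
    intro cur c h
    simp only [pvNoAdjB, Bool.and_eq_true, Bool.not_eq_eq_eq_not, Bool.not_true] at h
    have hk : (pvKey cur == pvKey m2) = false := by simpa using h.1
    simp [pvPassGo, hk, ih m2 c h.2]

theorem pv_passGo_empty_mem (rest : List (List String)) : ∀ (cur : List String) (c : Bool),
    (∃ m ∈ cur :: rest, pvKey m = "") → ∃ m ∈ (pvPassGo cur rest c).1, pvKey m = "" := by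
  induction rest with
  | nil =>
    intro cur c h
    simpa [pvPassGo] using h
  | cons m2 rest' ih =>
    intro cur c h
    by_cases hk : pvKey cur == pvKey m2
    · rcases h with ⟨m, hm, hkey⟩
      rcases List.mem_cons.mp hm with rfl | hm
      · refine ⟨m.set 1 (pvTxt m ++ " " ++ pvTxt m2), by simp [pvPassGo, hk], ?_⟩
        rw [pv_key_set1]; exact hkey
      · have hx : ∃ m ∈ m2.set 0 "" :: rest', pvKey m = "" := by
          rcases List.mem_cons.mp hm with rfl | hm
          · exact ⟨m.set 0 "", by simp, pv_key_set0 m⟩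
          · exact ⟨m, List.mem_cons_of_mem _ hm, hkey⟩
        rcases ih (m2.set 0 "") true hx with ⟨m', hm', hk'⟩
        exact ⟨m', by simp [pvPassGo, hk, hm'], hk'⟩
    · rcases h with ⟨m, hm, hkey⟩
      rcases List.mem_cons.mp hm with rfl | hm
      · exact ⟨m, by simp [pvPassGo, hk], hkey⟩
      · rcases ih m2 c ⟨m, hm, hkey⟩ with ⟨m', hm', hk'⟩
        exact ⟨m', by simp [pvPassGo, hk, hm'], hk'⟩

theorem pv_passGo_marks (rest : List (List String)) : ∀ (cur : List String),
    (pvPassGo cur rest false).2 = true → ∃ m ∈ (pvPassGo cur rest false).1, pvKey m = "" := by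
  induction rest with
  | nil => intro cur h; simp [pvPassGo] at h
  | cons m2 rest' ih =>
    intro cur h
    by_cases hk : pvKey cur == pvKey m2
    · rcases pv_passGo_empty_mem rest' (m2.set 0 "") true
        ⟨m2.set 0 "", by simp, pv_key_set0 m2⟩ with ⟨m', hm', hk'⟩
      exact ⟨m', by simp [pvPassGo, hk, hm'], hk'⟩
    · simp only [pvPassGo, hk, Bool.false_eq_true, ↓reduceIte] at h ⊢
      rcases ih m2 h with ⟨m', hm', hk'⟩
      exact ⟨m', by simp [hm'], hk'⟩

theorem pv_passGo_mem (rest : List (List String)) : ∀ (cur : List String) (c : Bool),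
    ∀ m ∈ (pvPassGo cur rest c).1,
      pvKey m = "" ∨ ∃ y ∈ cur :: rest, y.length = m.length ∧ pvKey y = pvKey m := by
  induction rest with
  | nil =>
    intro cur c m hm
    simp [pvPassGo] at hm
    exact Or.inr ⟨cur, by simp, by simp [hm]⟩
  | cons m2 rest' ih =>
    intro cur c m hm
    by_cases hk : pvKey cur == pvKey m2
    · simp only [pvPassGo, hk, if_pos, List.mem_cons] at hm
      rcases hm with rfl | hm
      · exact Or.inr ⟨cur, by simp, by simp [pv_key_set1, List.length_set]⟩
      · rcases ih (m2.set 0 "") true m hm with h | ⟨y, hy, h1, h2⟩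
        · exact Or.inl h
        · rcases List.mem_cons.mp hy with rfl | hy
          · rw [pv_key_set0] at h2
            exact Or.inl h2.symm
          · exact Or.inr ⟨y, List.mem_cons_of_mem _ (List.mem_cons_of_mem _ hy), h1, h2⟩
    · simp only [pvPassGo, hk, Bool.false_eq_true, ↓reduceIte, List.mem_cons] at hm
      rcases hm with rfl | hm
      · exact Or.inr ⟨m, by simp, rfl, rfl⟩
      · rcases ih m2 c m hm with h | ⟨y, hy, h1, h2⟩
        · exact Or.inl h
        · exact Or.inr ⟨y, List.mem_cons_of_mem _ hy, h1, h2⟩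

theorem pv_passGo_countP (rest : List (List String)) : ∀ (cur : List String) (c : Bool)
    (k : String), ¬ k = "" →
    (pvPassGo cur rest c).1.countP (fun x => pvKey x == k) ≤
      (cur :: rest).countP (fun x => pvKey x == k) := by
  induction rest with
  | nil => intro cur c k _; simp [pvPassGo]
  | cons m2 rest' ih =>
    intro cur c k hk
    by_cases he : pvKey cur == pvKey m2
    · have h1 := ih (m2.set 0 "") true k hk
      have e0 : (pvKey (m2.set 0 "") == k) = false := by
        rw [pv_key_set0]
        exact beq_eq_false_iff_ne.mpr (fun h => hk h.symm)
      have c2 := pv_countP_cons_f (fun x => pvKey x == k) (m2.set 0 "") rest' e0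
      have e1 : (pvKey (cur.set 1 (pvTxt cur ++ " " ++ pvTxt m2)) == k) = (pvKey cur == k) := by
        rw [pv_key_set1]
      have c3 := pv_countP_cons (fun x => pvKey x == k)
        (cur.set 1 (pvTxt cur ++ " " ++ pvTxt m2)) ((pvPassGo (m2.set 0 "") rest' true).1)
      rw [e1] at c3
      have c4 := pv_countP_cons (fun x => pvKey x == k) cur (m2 :: rest')
      have c5 := pv_countP_cons (fun x => pvKey x == k) m2 rest'
      simp only [pvPassGo, he, if_pos]
      omega
    · have h1 := ih m2 c k hk
      have c1 := pv_countP_cons (fun x => pvKey x == k) cur ((pvPassGo m2 rest' c).1)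
      have c4 := pv_countP_cons (fun x => pvKey x == k) cur (m2 :: rest')
      simp only [pvPassGo, he, Bool.false_eq_true, ↓reduceIte]
      omega

theorem pvU_passGo (rest : List (List String)) : ∀ (cur : List String) (c : Bool),
    pvU (cur :: rest) → pvU ((pvPassGo cur rest c).1) := by
  induction rest with
  | nil =>
    intro cur c hU m hm hlen
    simp only [pvPassGo, List.mem_cons, List.not_mem_nil, or_false] at hm
    subst hm
    rcases hU m (by simp) hlen with h | h
    · exact Or.inl h
    · exact Or.inr (by simpa [pvPassGo] using h)
  | cons m2 rest' ih =>
    intro cur c hU m hm hlen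
    by_cases he : pvKey cur == pvKey m2
    case pos =>
      have hkey : pvKey cur = pvKey m2 := by simpa using he
      have hUm : pvU (m2.set 0 "" :: rest') := pvU_mark cur m2 rest' hU
      have hUX : pvU ((pvPassGo (m2.set 0 "") rest' true).1) := ih (m2.set 0 "") true hUm
      simp only [pvPassGo, he, if_pos, List.mem_cons] at hm ⊢
      rcases hm with rfl | hm
      · by_cases hk0 : pvKey cur = ""
        · exact Or.inl (by rw [pv_key_set1]; exact hk0)
        · exfalso
          have h2 := pvU_two cur m2 rest' hU hkey hk0
          rw [List.length_set] at hlen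
          omega
      · by_cases hk0 : pvKey m = ""
        · exact Or.inl hk0
        · refine Or.inr ?_
          have hcX : (pvPassGo (m2.set 0 "") rest' true).1.countP (fun x => pvKey x == pvKey m) ≤
              (m2.set 0 "" :: rest').countP (fun x => pvKey x == pvKey m) :=
            pv_passGo_countP rest' (m2.set 0 "") true (pvKey m) hk0
          have e0 : (pvKey (m2.set 0 "") == pvKey m) = false := by
            rw [pv_key_set0]; exact beq_eq_false_iff_ne.mpr (fun h => hk0 h.symm)
          have c0 := pv_countP_cons_f (fun x => pvKey x == pvKey m) (m2.set 0 "") rest' e0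
          rcases pv_passGo_mem rest' (m2.set 0 "") true m hm with h | ⟨y, hy, hylen, hykey⟩
          · exact absurd h hk0
          · have hyrest : y ∈ rest' := by
              rcases List.mem_cons.mp hy with rfl | hy
              · exfalso; apply hk0; rw [← hykey, pv_key_set0]
              · exact hy
            by_cases hkc : pvKey cur = pvKey m
            · exfalso
              rcases hU y (by simp [hyrest]) (by omega) with h' | h'
              · exact hk0 (hykey ▸ h')
              · have c1 := pv_countP_cons_t (fun x => pvKey x == pvKey y) cur (m2 :: rest')
                  (by simp [hkc, hykey])
                have c2 := pv_countP_cons (fun x => pvKey x == pvKey y) m2 rest'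
                have hyc : 1 ≤ rest'.countP (fun x => pvKey x == pvKey y) :=
                  pv_countP_mem _ rest' y hyrest (by simp)
                omega
            · have ec : (pvKey (cur.set 1 (pvTxt cur ++ " " ++ pvTxt m2)) == pvKey m) = false := by
                rw [pv_key_set1]; exact beq_eq_false_iff_ne.mpr hkc
              have hXle : (pvPassGo (m2.set 0 "") rest' true).1.countP (fun x => pvKey x == pvKey m) ≤ 1 := by
                rcases hUX m hm hlen with h' | h'
                · exact absurd h' hk0
                · exact h'
              have c3 := pv_countP_cons_f (fun x => pvKey x == pvKey m)
                (cur.set 1 (pvTxt cur ++ " " ++ pvTxt m2)) ((pvPassGo (m2.set 0 "") rest' true).1) ec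
              omega
    case neg =>
      have hUt : pvU (m2 :: rest') := pvU_tail cur _ hU
      have hUX : pvU ((pvPassGo m2 rest' c).1) := ih m2 c hUt
      simp only [pvPassGo, he, Bool.false_eq_true, ↓reduceIte, List.mem_cons] at hm ⊢
      rcases hm with rfl | hm
      · rcases hU m (by simp) hlen with h | h
        · exact Or.inl h
        · by_cases hk0 : pvKey m = ""
          · exact Or.inl hk0
          · refine Or.inr ?_
            have hcX := pv_passGo_countP rest' m2 c (pvKey m) hk0
            have c1 := pv_countP_cons_t (fun x => pvKey x == pvKey m) m
              ((pvPassGo m2 rest' c).1) (by simp)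
            have c2 := pv_countP_cons_t (fun x => pvKey x == pvKey m) m (m2 :: rest') (by simp)
            omega
      · by_cases hk0 : pvKey m = ""
        · exact Or.inl hk0
        · refine Or.inr ?_
          rcases hUX m hm hlen with h' | h'
          · exact absurd h' hk0
          · by_cases hkc : pvKey cur = pvKey m
            · exfalso
              rcases pv_passGo_mem rest' m2 c m hm with h | ⟨y, hy, hylen, hykey⟩
              · exact hk0 h
              · rcases hU y (List.mem_cons_of_mem _ hy) (by omega) with h'' | h''
                · exact hk0 (hykey ▸ h'')
                · have c1 := pv_countP_cons_t (fun x => pvKey x == pvKey y) cur (m2 :: rest')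
                    (by simp [hkc, hykey])
                  have hyc : 1 ≤ (m2 :: rest').countP (fun x => pvKey x == pvKey y) :=
                    pv_countP_mem _ _ y hy (by simp)
                  omega
            · have ec : (pvKey cur == pvKey m) = false := beq_eq_false_iff_ne.mpr hkc
              have c1 := pv_countP_cons_f (fun x => pvKey x == pvKey m) cur
                ((pvPassGo m2 rest' c).1) ec
              omega

theorem pv_pass_len (l : List (List String)) (c : Bool) : ((pvPassA l c).1).length = l.length := by
  cases l with
  | nil => rfl
  | cons m rest => simpa using pv_passGo_len rest m c

theorem pvU_pass (l : List (List String)) (c : Bool) (hU : pvU l) : pvU ((pvPassA l c).1) := by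
  cases l with
  | nil => intro m hm; simp [pvPassA] at hm
  | cons m rest => exact pvU_passGo rest m c hU

-- ---- facts about the filter ----
theorem pv_filt_lt (l : List (List String)) (h : ∃ m ∈ l, pvKey m = "") :
    (pvFilt l).length < l.length := by
  induction l with
  | nil => simp at h
  | cons a t ih =>
    by_cases hk : pvKey a = ""
    · have hfe : pvFilt (a :: t) = pvFilt t := by simp [pvFilt, List.filter_cons, hk]
      have h1 : (pvFilt t).length ≤ t.length := List.length_filter_le _ t
      rw [hfe]
      simp only [List.length_cons]
      omega
    · rcases h with ⟨m, hm, hkey⟩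
      rcases List.mem_cons.mp hm with rfl | hm
      · exact absurd hkey hk
      · have hfe : pvFilt (a :: t) = a :: pvFilt t := by simp [pvFilt, List.filter_cons, hk]
        have := ih ⟨m, hm, hkey⟩
        rw [hfe]
        simp only [List.length_cons]
        omega

theorem pv_filt_filt (l : List (List String)) : pvFilt (pvFilt l) = pvFilt l := by
  simp [pvFilt, List.filter_filter]

theorem pv_filt_noempty (l : List (List String)) : ∀ m ∈ pvFilt l, ¬ pvKey m = "" := by
  intro m hm
  have := (List.mem_filter.mp hm).2
  simpa using this

theorem pvU_filt (l : List (List String)) (hU : pvU l) : pvU (pvFilt l) := by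
  intro m hm hlen
  have hml : m ∈ l := (List.mem_filter.mp hm).1
  rcases hU m hml hlen with h | h
  · exact Or.inl h
  · exact Or.inr (le_trans (pv_countP_filter_le _ _ l) h)

-- ---- the one-pass normal form ----
def pvStep (m : List String) (acc : List (List String)) : List (List String) :=
  match acc with
  | [] => [m]
  | a :: t => if pvKey a == pvKey m then m.set 1 (pvTxt m ++ " " ++ pvTxt a) :: t else m :: a :: t

def pvNorm (l : List (List String)) : List (List String) := (pvFilt l).foldr pvStep []

theorem pv_norm_cons (m : List String) (l : List (List String)) :
    pvNorm (m :: l) = if pvKey m = "" then pvNorm l else pvStep m (pvNorm l) := by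
  by_cases h : pvKey m = "" <;> simp [pvNorm, pvFilt, List.filter_cons, h]

theorem pv_foldr_head (t : List (List String)) :
    ∀ h tl, t.foldr pvStep [] = h :: tl → ∃ y ∈ t, pvKey y = pvKey h ∧ y.length = h.length := by
  induction t with
  | nil => intro h tl he; simp at he
  | cons a t' ih =>
    intro h tl he
    simp only [List.foldr_cons] at he
    cases hx : t'.foldr pvStep [] with
    | nil =>
      rw [hx] at he
      simp only [pvStep] at he
      injection he with h1 h2
      subst h1
      exact ⟨a, by simp, rfl, rfl⟩
    | cons b tb =>
      rw [hx] at he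
      by_cases hk : pvKey b == pvKey a
      · simp only [pvStep, hk, if_pos] at he
        injection he with h1 h2
        exact ⟨a, by simp, by rw [← h1, pv_key_set1], by rw [← h1, List.length_set]⟩
      · simp only [pvStep, hk, Bool.false_eq_true, ↓reduceIte] at he
        injection he with h1 h2
        exact ⟨a, by simp, by rw [← h1], by rw [← h1]⟩

-- ---- B computes the one-pass normal form ----
def pvSpecRes (cur : List String) (text : String) (merged : Bool) :
    List (List String) → List (List String)
  | [] => [if merged then cur.set 1 text else cur]
  | h :: t =>
    if pvKey h = pvKey cur then cur.set 1 (text ++ " " ++ pvTxt h) :: t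
    else (if merged then cur.set 1 text else cur) :: h :: t

theorem pv_altAcc_spec (l : List (List String)) : pvU l → (∀ m ∈ l, ¬ pvKey m = "") →
    ∀ (cur : List String) (text : String) (merged : Bool),
    pvAltAcc cur text merged l = pvSpecRes cur text merged (l.foldr pvStep []) := by
  induction l with
  | nil => intro _ _ cur text merged; rfl
  | cons x t ih =>
    intro hU hne cur text merged
    have hU' := pvU_tail x t hU
    have hne' : ∀ m ∈ t, ¬ pvKey m = "" := fun m hm => hne m (List.mem_cons_of_mem _ hm)
    by_cases hxc : pvKey x = pvKey cur
    case pos =>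
      have hbe : (pvKey x == pvKey cur) = true := by simp [hxc]
      rw [show pvAltAcc cur text merged (x :: t)
            = pvAltAcc cur (text ++ " " ++ pvTxt x) true t from by simp [pvAltAcc, hbe]]
      rw [ih hU' hne' cur (text ++ " " ++ pvTxt x) true]
      simp only [List.foldr_cons]
      cases hR : t.foldr pvStep [] with
      | nil => simp [pvSpecRes, pvStep, hxc]
      | cons h tl =>
        by_cases hhx : pvKey h = pvKey x
        · have hx2 : 2 ≤ x.length := by
            rcases pv_foldr_head t h tl hR with ⟨y, hy, hyk, hyl⟩
            by_contra hxl
            rcases hU x (by simp) (by omega) with h' | h'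
            · exact hne x (by simp) h'
            · have c1 := pv_countP_cons_t (fun z => pvKey z == pvKey x) x t (by simp)
              have hyc : 1 ≤ t.countP (fun z => pvKey z == pvKey x) :=
                pv_countP_mem _ t y hy (by simp [hyk, hhx])
              omega
          have hbh : (pvKey h == pvKey x) = true := by simp [hhx]
          have hhc : pvKey h = pvKey cur := hhx.trans hxc
          rw [show pvStep x (h :: tl) = x.set 1 (pvTxt x ++ " " ++ pvTxt h) :: tl from by
            simp [pvStep, hbh]]
          simp [pvSpecRes, hhc, pv_key_set1, hxc, pv_txt_set1 _ _ hx2, pv_str_assoc]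
        · have hbh : (pvKey h == pvKey x) = false := by simp [hhx]
          have hhc : ¬ pvKey h = pvKey cur := fun hcon => hhx (hcon.trans hxc.symm)
          simp [pvSpecRes, pvStep, hbh, hhc, hxc]
    case neg =>
      have hbe : (pvKey x == pvKey cur) = false := by simp [hxc]
      rw [show pvAltAcc cur text merged (x :: t)
            = (if merged then cur.set 1 text else cur) :: pvAltAcc x (pvTxt x) false t from by
          simp [pvAltAcc, hbe]]
      rw [ih hU' hne' x (pvTxt x) false]
      simp only [List.foldr_cons]
      cases hR : t.foldr pvStep [] with
      | nil => simp [pvSpecRes, pvStep, hxc]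
      | cons h tl =>
        by_cases hhx : pvKey h = pvKey x
        · have hbh : (pvKey h == pvKey x) = true := by simp [hhx]
          rw [show pvStep x (h :: tl) = x.set 1 (pvTxt x ++ " " ++ pvTxt h) :: tl from by
            simp [pvStep, hbh]]
          simp [pvSpecRes, hhx, hxc, pv_key_set1]
        · have hbh : (pvKey h == pvKey x) = false := by simp [hhx]
          simp [pvSpecRes, pvStep, hbh, hhx, hxc]

theorem pv_alt_eq_norm (l : List (List String)) (hU : pvU l) :
    pvAltTop (pvFilt l) = pvNorm l := by
  cases hf : pvFilt l with
  | nil => simp [pvAltTop, pvNorm, hf]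
  | cons m rest =>
    have hUf : pvU (m :: rest) := hf ▸ pvU_filt l hU
    have hnef : ∀ x ∈ m :: rest, ¬ pvKey x = "" := fun x hx =>
      pv_filt_noempty l x (hf ▸ hx)
    have hU' := pvU_tail m rest hUf
    have hne' : ∀ x ∈ rest, ¬ pvKey x = "" := fun x hx => hnef x (List.mem_cons_of_mem _ hx)
    show pvAltAcc m (pvTxt m) false rest = pvNorm l
    rw [pv_altAcc_spec rest hU' hne' m (pvTxt m) false]
    have hnorm : pvNorm l = pvStep m (rest.foldr pvStep []) := by
      simp [pvNorm, hf]
    rw [hnorm]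
    cases hR : rest.foldr pvStep [] with
    | nil => simp [pvSpecRes, pvStep]
    | cons h tl =>
      by_cases hh : pvKey h = pvKey m
      · have hbh : (pvKey h == pvKey m) = true := by simp [hh]
        simp [pvSpecRes, pvStep, hh, hbh]
      · have hbh : (pvKey h == pvKey m) = false := by simp [hh]
        simp [pvSpecRes, pvStep, hh, hbh]

-- ---- a pass preserves the normal form ----
theorem pv_step_fire (m1 m2 : List String) (acc : List (List String))
    (hk : pvKey m1 = pvKey m2) (h1 : 2 ≤ m1.length) (h2 : 2 ≤ m2.length) :
    pvStep (m1.set 1 (pvTxt m1 ++ " " ++ pvTxt m2)) acc = pvStep m1 (pvStep m2 acc) := by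
  cases acc with
  | nil =>
    simp [pvStep, hk]
  | cons a t =>
    by_cases ha : pvKey a == pvKey m2
    · have ha' : (pvKey a == pvKey m1) = true := by simp_all
      have ha1 : (pvKey a == pvKey (m1.set 1 (pvTxt m1 ++ " " ++ pvTxt m2))) = true := by
        rw [pv_key_set1]; exact ha'
      have hm21 : (pvKey (m2.set 1 (pvTxt m2 ++ " " ++ pvTxt a)) == pvKey m1) = true := by
        rw [pv_key_set1]; simp [hk]
      simp only [pvStep, ha, ha1, hm21, if_pos, List.set_set]
      rw [pv_txt_set1 _ _ h1, pv_txt_set1 _ _ h2]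
      simp [pv_str_assoc]
    · have ha1 : (pvKey a == pvKey (m1.set 1 (pvTxt m1 ++ " " ++ pvTxt m2))) = false := by
        rw [pv_key_set1]; simpa [hk] using ha
      have hm21 : (pvKey m2 == pvKey m1) = true := by simp [hk]
      simp [pvStep, ha, ha1, hm21]

theorem pv_passGo_norm (rest : List (List String)) : ∀ (cur : List String) (c : Bool),
    pvU (cur :: rest) → pvNorm ((pvPassGo cur rest c).1) = pvNorm (cur :: rest) := by
  induction rest with
  | nil => intro cur c _; rfl
  | cons m2 rest' ih =>
    intro cur c hU
    by_cases he : pvKey cur == pvKey m2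
    · have hkey : pvKey cur = pvKey m2 := by simpa using he
      have hUm : pvU (m2.set 0 "" :: rest') := pvU_mark cur m2 rest' hU
      have ihX : pvNorm ((pvPassGo (m2.set 0 "") rest' true).1) = pvNorm (m2.set 0 "" :: rest') :=
        ih (m2.set 0 "") true hUm
      have hXc : pvNorm (m2.set 0 "" :: rest') = pvNorm rest' := by
        rw [pv_norm_cons, if_pos (pv_key_set0 m2)]
      simp only [pvPassGo, he, if_pos]
      rw [pv_norm_cons, ihX, hXc]
      by_cases hk0 : pvKey cur = ""
      · rw [if_pos (by rw [pv_key_set1]; exact hk0)]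
        rw [pv_norm_cons, if_pos hk0, pv_norm_cons, if_pos (hkey ▸ hk0)]
      · have h2 := pvU_two cur m2 rest' hU hkey hk0
        rw [if_neg (by rw [pv_key_set1]; exact hk0)]
        rw [pv_norm_cons, if_neg hk0, pv_norm_cons, if_neg (fun hcon => hk0 (hkey.trans hcon))]
        exact pv_step_fire cur m2 (pvNorm rest') hkey h2.1 h2.2
    · have ihX : pvNorm ((pvPassGo m2 rest' c).1) = pvNorm (m2 :: rest') :=
        ih m2 c (pvU_tail cur _ hU)
      simp only [pvPassGo, he, Bool.false_eq_true, ↓reduceIte]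
      rw [pv_norm_cons cur ((pvPassGo m2 rest' c).1), ihX, pv_norm_cons cur (m2 :: rest')]

theorem pv_pass_norm (l : List (List String)) (c : Bool) (hU : pvU l) :
    pvNorm ((pvPassA l c).1) = pvNorm l := by
  cases l with
  | nil => rfl
  | cons m rest => exact pv_passGo_norm rest m c hU

-- ---- the no-change cases ----
theorem pv_alt_id (l : List (List String)) : ∀ (cur : List String) (text : String),
    pvNoAdjB (cur :: l) = true → pvAltAcc cur text false l = cur :: l := by
  induction l with
  | nil => intro cur text _; rfl
  | cons x t ih =>
    intro cur text h
    simp only [pvNoAdjB, Bool.and_eq_true, Bool.not_eq_eq_eq_not, Bool.not_true] at h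
    have hcx : ¬ pvKey cur = pvKey x := by simpa using h.1
    have hk : (pvKey x == pvKey cur) = false :=
      beq_eq_false_iff_ne.mpr (fun he => hcx he.symm)
    have h2 : pvNoAdjB (x :: t) = true := by
      rcases t with _ | ⟨y, t'⟩
      · rfl
      · exact h.2
    simp [pvAltAcc, hk, ih x (pvTxt x) h2]

theorem pv_altTop_id (l : List (List String)) (h : pvNoAdjB l = true) : pvAltTop l = l := by
  cases l with
  | nil => rfl
  | cons m rest => exact pv_alt_id rest m (pvTxt m) h

-- ---- the main loop ----
theorem pv_loop_main : ∀ (fuel : Nat) (l : List (List String)), l.length < fuel → pvU l →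
    (pvNoAdjB l = true → pvNoAdjB (pvFilt l) = true) →
    pvLoopA fuel l = pvAltTop (pvFilt l) := by
  intro fuel
  induction fuel with
  | zero => intro l h; omega
  | succ n ih =>
    intro l hlen hU hH
    by_cases hc : (pvPassA l false).2 = true
    · -- a merge happened
      have hex : ∃ m ∈ (pvPassA l false).1, pvKey m = "" := by
        cases l with
        | nil => simp [pvPassA] at hc
        | cons m rest => exact pv_passGo_marks rest m hc
      have hlt : (pvFilt (pvPassA l false).1).length < l.length := by
        have h1 := pv_filt_lt _ hex
        have h2 := pv_pass_len l false
        omega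
      have hU1 : pvU (pvFilt (pvPassA l false).1) := pvU_filt _ (pvU_pass l false hU)
      have hstep : pvLoopA (n+1) l = pvLoopA n (pvFilt (pvPassA l false).1) := by
        simp [pvLoopA, hc]
      rw [hstep, ih _ (by omega) hU1 (by rw [pv_filt_filt]; exact fun h => h)]
      rw [pv_filt_filt]
      have e1 : pvAltTop (pvFilt ((pvPassA l false).1)) = pvNorm ((pvPassA l false).1) :=
        pv_alt_eq_norm _ (pvU_pass l false hU)
      have e2 : pvAltTop (pvFilt l) = pvNorm l := pv_alt_eq_norm _ hU
      rw [e1, e2, pv_pass_norm l false hU]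
    · -- no merge: the pass is the identity
      have hc' : (pvPassA l false).2 = false := by simpa using hc
      have hid : (pvPassA l false).1 = l ∧ pvNoAdjB l = true := by
        cases l with
        | nil => exact ⟨rfl, rfl⟩
        | cons m rest => exact pv_passGo_false_id rest m hc'
      have hval : pvLoopA (n+1) l = pvFilt l := by
        simp [pvLoopA, hc', hid.1]
      rw [hval, pv_altTop_id _ (hH hid.2)]

theorem pv_pre_U (conv : List (List String)) (h : Pre_mergeSameAuthors conv) : pvU conv := by
  intro m hm hlen
  rcases h m hm with h2 | ⟨h1, hk, hc⟩
  · omega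
  · exact Or.inr (by simpa [pvKey] using hc)

-- ---- tightness helpers ----
theorem pv_altAcc_len_le (l : List (List String)) : ∀ (cur : List String) (text : String)
    (merged : Bool), (pvAltAcc cur text merged l).length ≤ l.length + 1 := by
  induction l with
  | nil => intro cur text merged; simp [pvAltAcc]
  | cons x t ih =>
    intro cur text merged
    by_cases hk : pvKey x == pvKey cur
    · simp only [pvAltAcc, hk, if_pos]
      have := ih cur (text ++ " " ++ pvTxt x) true
      simp only [List.length_cons]
      omega
    · simp only [pvAltAcc, hk, Bool.false_eq_true, ↓reduceIte]
      have := ih x (pvTxt x) false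
      simp only [List.length_cons]
      omega

theorem pv_altAcc_len_lt (l : List (List String)) : ∀ (cur : List String) (text : String)
    (merged : Bool), pvNoAdjB (cur :: l) = false →
    (pvAltAcc cur text merged l).length < l.length + 1 := by
  induction l with
  | nil => intro cur text merged h; simp [pvNoAdjB] at h
  | cons x t ih =>
    intro cur text merged h
    by_cases hk : pvKey x == pvKey cur
    · simp only [pvAltAcc, hk, if_pos]
      have := pv_altAcc_len_le t cur (text ++ " " ++ pvTxt x) true
      simp only [List.length_cons]
      omega
    · have hne : pvNoAdjB (x :: t) = false := by
        cases hnn : pvNoAdjB (x :: t)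
        · rfl
        · exfalso
          have h1 : ¬ pvKey x = pvKey cur := by simpa using hk
          have h2 : (pvKey cur == pvKey x) = false :=
            beq_eq_false_iff_ne.mpr (fun e => h1 e.symm)
          have hh : pvNoAdjB (cur :: x :: t) = true := by
            simp only [pvNoAdjB, Bool.and_eq_true]
            exact ⟨by simp [h2], hnn⟩
          rw [hh] at h
          simp at h
      simp only [pvAltAcc, hk, Bool.false_eq_true, ↓reduceIte, List.length_cons]
      have := ih x (pvTxt x) false hne
      omega

-- ===== VERDICT (by name: the statement is the Claim_ definition above) =====
theorem mergeSameAuthors_spec : Claim_unchanged_mergeSameAuthors := by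
  intro conv _ hPre hD
  show mergeSameAuthors conv = mergeSameAuthors_alt conv
  unfold mergeSameAuthors mergeSameAuthors_alt
  apply pv_loop_main (conv.length + 1) conv (by omega) (pv_pre_U conv hPre)
  intro hch
  by_cases hg : pvGapB conv = true
  · refine absurd ?_ hD
    show _ = true
    rw [Bool.and_eq_true]
    exact ⟨(pv_noadj_bridge conv) ▸ hch, (pv_gap_bridge conv) ▸ hg⟩
  · exact pv_chain_filt conv hch (by simpa using hg)

theorem mergeSameAuthors_changed : Claim_changed_mergeSameAuthors := by
  unfold Claim_changed_mergeSameAuthors; decide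

theorem mergeSameAuthors_tight : Claim_exact_mergeSameAuthors := by
  intro conv _ hPre hD
  rw [D_mergeSameAuthors, Bool.and_eq_true] at hD
  rcases hD with ⟨h1, h2⟩
  have hch : pvNoAdjB conv = true := (pv_noadj_bridge conv).trans h1
  have hg : pvGapB conv = true := (pv_gap_bridge conv).trans h2
  have hA : mergeSameAuthors conv = pvFilt conv := by
    unfold mergeSameAuthors
    have hid : pvPassA conv false = (conv, false) := by
      cases conv with
      | nil => rfl
      | cons m rest => exact pv_passGo_of_noadj rest m false hch
    simp [pvLoopA, hid]
  have hB : (mergeSameAuthors_alt conv).length < (pvFilt conv).length := by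
    unfold mergeSameAuthors_alt
    have hbrk := pv_gap_breaks conv hch hg
    cases hf : pvFilt conv with
    | nil => rw [hf] at hbrk; simp [pvNoAdjB] at hbrk
    | cons m rest =>
      rw [hf] at hbrk
      have := pv_altAcc_len_lt rest m (pvTxt m) false hbrk
      simpa [pvAltTop] using this
  intro he
  rw [hA] at he
  rw [← he] at hB
  omega
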